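-- pv_equiv track=rewrite | github.com/2024-2-fundamentos-de-analitica/2024-2-LAB-01-python-basico-Jcastanour | homework/pregunta_02.py | registros_letras
-- ===== SOURCE A (Python) =====
-- def registros_letras(data):
--     letras = {}
--     for row in data:
--         if row[0] in letras:
--             letras[row[0]] += 1
--         else:
--             letras[row[0]] = 1
--     return sorted(letras.items())
-- ===== SOURCE B (Python) =====
-- def registros_letras(data):
--     keys = sorted(row[0] for row in data)
--
--     def group(ks):
--         if not ks:
--             return []
--         k = ks[0]
--         n = 1
--         while n < len(ks) and ks[n] == k:
--             n += 1
--         return [(k, n)] + group(ks[n:])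
--
--     return group(keys)
-- ===== Notes on version B (the rewrite author's own statement) =====
-- stated objective: alternative
-- what changed: Replaces dict-based counting followed by a sort of the items with sort-all-keys-first and a single linear grouping pass over consecutive equal keys (no dict at all).
import Mathlib
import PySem

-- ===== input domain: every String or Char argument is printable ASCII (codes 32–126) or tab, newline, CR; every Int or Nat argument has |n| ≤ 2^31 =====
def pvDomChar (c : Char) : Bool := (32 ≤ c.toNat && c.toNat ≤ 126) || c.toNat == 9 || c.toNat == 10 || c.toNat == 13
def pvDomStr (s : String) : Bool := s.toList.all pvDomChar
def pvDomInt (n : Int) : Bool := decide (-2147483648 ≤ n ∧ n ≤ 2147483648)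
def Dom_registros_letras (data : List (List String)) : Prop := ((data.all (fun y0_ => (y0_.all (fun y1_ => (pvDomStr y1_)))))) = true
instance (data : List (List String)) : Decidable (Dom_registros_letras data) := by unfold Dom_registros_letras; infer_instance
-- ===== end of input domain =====

-- B replaces dict counting + sort of items by sort-all-keys-first + one linear grouping pass
-- (alternative decomposition, no dict); equivalence of the return values is proved on Pre_
-- (no empty rows: Python A raises IndexError on row[0] there, and so does B).

-- ===== PORT A =====
-- row[0] is exact on Pre_ (all rows nonempty): headD "" = row[0] then.
def registros_letras (data : List (List String)) : List (String × Int) :=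
  let letras := data.foldl (fun d row =>
    let k := row.headD ""
    if d.contains k then d.insert k (d.getD k 0 + 1) else d.insert k 1) PySem.Dict.empty
  PySem.List.sorted2 letras.items (fun p => p.1) (fun p => p.2) false

-- ===== PORT B =====
-- the inner 'group': ks[0], the while loop counting leading equals (takeWhile), recurse on ks[n:].
def rlGroup : List String → List (String × Int)
  | [] => []
  | k :: ks =>
      (k, (1 + (ks.takeWhile (fun x => x == k)).length : Int)) ::
        rlGroup (ks.dropWhile (fun x => x == k))
  termination_by l => l.length
  decreasing_by
    simpa using Nat.lt_succ_of_le (List.length_dropWhile_le _ _)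

def registros_letras_alt (data : List (List String)) : List (String × Int) :=
  rlGroup (PySem.List.sorted (data.map (fun row => row.headD "")) (fun x => x) false)

-- ===== PRECONDITION & SPEC =====
-- Pre_ excludes inputs containing an empty row: Python A raises IndexError on row[0] there.
def Pre_registros_letras (data : List (List String)) : Prop := ∀ row ∈ data, row ≠ []
instance (data : List (List String)) : Decidable (Pre_registros_letras data) := by
  unfold Pre_registros_letras; infer_instance
def pvWitness_registros_letras : List (List String) := [["b"], ["a", "z"], ["b"]]
def Spec_registros_letras (data : List (List String)) (out : List (String × Int)) : Prop := out = registros_letras_alt data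
instance (data : List (List String)) (out : List (String × Int)) : Decidable (Spec_registros_letras data out) := by unfold Spec_registros_letras; infer_instance

-- ===== CLAIM (what is proved, stated in full; the proofs are below) =====
def Claim_equal_registros_letras : Prop := ∀ (data : List (List String)), Dom_registros_letras data → Pre_registros_letras data → Spec_registros_letras data (registros_letras data)

-- ===== LEMMAS AND PROOFS =====

theorem foldA_gen (data : List (List String)) (d : PySem.Dict String Int) :
    data.foldl (fun d row =>
      let k := row.headD ""
      if d.contains k then d.insert k (d.getD k 0 + 1) else d.insert k 1) d
    = (data.map (fun row => row.headD "")).foldl (fun d k => d.insert k (d.getD k 0 + 1)) d := by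
  induction data generalizing d with
  | nil => rfl
  | cons r rs ih =>
      simp only [List.foldl_cons, List.map_cons]
      rw [← ih]
      congr 1
      show (if d.contains (r.headD "") = true then _ else _) = _
      by_cases h : d.contains (r.headD "") = true
      · simp only [if_pos h]
      · simp only [if_neg h]
        rw [PySem.Dict.getD_of_not_contains d 0 (by simpa using h)]
        norm_num

theorem foldA_eq_counter (data : List (List String)) :
    data.foldl (fun d row =>
      let k := row.headD ""
      if d.contains k then d.insert k (d.getD k 0 + 1) else d.insert k 1) PySem.Dict.empty
    = PySem.Dict.counter (data.map (fun row => row.headD "")) := by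
  rw [foldA_gen, PySem.Dict.foldl_insert_getD_add_one_eq_counter]

theorem sorted2_eq_sorted_lex (xs : List (String × Int)) :
    PySem.List.sorted2 xs (fun p => p.1) (fun p => p.2) false
      = PySem.List.sorted xs (fun p => toLex (p.1, p.2)) false := by
  simp only [PySem.List.sorted2, PySem.List.sorted]
  congr 2
  funext acc x
  congr 1
  funext a b
  rcases lt_trichotomy a.1 b.1 with h | h | h
  · simp [h, Prod.Lex.toLex_lt_toLex, not_lt.2 (le_of_lt h)]
  · simp [h, Prod.Lex.toLex_lt_toLex]
  · simp [not_lt.2 (le_of_lt h), h, Prod.Lex.toLex_lt_toLex, ne_of_gt h]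

theorem lt_of_mem_dropWhile {k : String} {ks : List String}
    (h : (k :: ks).Pairwise (· ≤ ·)) :
    ∀ y ∈ ks.dropWhile (fun x => x == k), k < y := by
  obtain ⟨hk, hks⟩ := List.pairwise_cons.1 h
  have hsub := List.dropWhile_sublist (l := ks) (p := fun x => x == k)
  have hpd : (ks.dropWhile (fun x => x == k)).Pairwise (· ≤ ·) := hks.sublist hsub
  intro y hy
  have hky : k ≤ y := hk y (hsub.subset hy)
  rcases eq_or_lt_of_le hky with rfl | h2
  · exfalso
    cases hd : ks.dropWhile (fun x => x == k) with
    | nil => rw [hd] at hy; simp at hy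
    | cons x d' =>
        have hne : ks.dropWhile (fun x => x == k) ≠ [] := by simp [hd]
        have hx : ((ks.dropWhile (fun x => x == k)).head hne == k) = false :=
          List.head_dropWhile_not _ hne
        have h2 : (ks.dropWhile (fun x => x == k)).head? = some x := by rw [hd]; rfl
        rw [List.head?_eq_some_head hne] at h2
        have h3 : (ks.dropWhile (fun x => x == k)).head hne = x := Option.some.inj h2
        rw [h3] at hx
        rw [hd] at hy
        simp only [beq_eq_false_iff_ne] at hx
        rcases List.mem_cons.1 hy with rfl | hy'
        · exact hx rfl
        · have hxy : x ≤ k := by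
            rw [hd] at hpd
            exact (List.pairwise_cons.1 hpd).1 _ hy'
          have hkx : k ≤ x := hk x (hsub.subset (by rw [hd]; exact List.mem_cons_self))
          exact hx (le_antisymm hxy hkx)
  · exact h2

theorem foldl_add_cons {k : String} : ∀ (d s : List String), k ∉ d →
    d.foldl PySem.Set.add (k :: s) = k :: d.foldl PySem.Set.add s := by
  intro d
  induction d with
  | nil => intro s _; rfl
  | cons x d' ih =>
      intro s hk
      have hxk : x ≠ k := fun h => hk (h ▸ List.mem_cons_self)
      simp only [List.foldl_cons]
      have hadd : PySem.Set.add (k :: s) x = k :: PySem.Set.add s x := by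
        simp only [PySem.Set.add, PySem.Set.contains]
        by_cases hx : x ∈ s
        · simp [hx, hxk]
        · simp [hx, hxk]
      rw [hadd, ih _ (fun h => hk (List.mem_cons_of_mem _ h))]

theorem foldl_add_all_eq {k : String} : ∀ (t s : List String), (∀ x ∈ t, x = k) → k ∈ s →
    t.foldl PySem.Set.add s = s := by
  intro t
  induction t with
  | nil => intro s _ _; rfl
  | cons x t' ih =>
      intro s hall hks
      have hx : x = k := hall x List.mem_cons_self
      simp only [List.foldl_cons]
      have : PySem.Set.add s x = s := by
        simp only [PySem.Set.add, PySem.Set.contains]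
        simp [hx, hks]
      rw [this]
      exact ih s (fun y hy => hall y (List.mem_cons_of_mem _ hy)) hks

theorem ofList_cons_decomp {k : String} {ks : List String}
    (h : (k :: ks).Pairwise (· ≤ ·)) :
    PySem.Set.ofList (k :: ks) = k :: PySem.Set.ofList (ks.dropWhile (fun x => x == k)) := by
  have hknd : k ∉ ks.dropWhile (fun x => x == k) := fun hm =>
    lt_irrefl k (lt_of_mem_dropWhile h k hm)
  have htk : ∀ x ∈ ks.takeWhile (fun x => x == k), x = k := by
    intro x hx
    simpa using List.mem_takeWhile_imp hx
  rw [PySem.Set.ofList_eq_foldl, PySem.Set.ofList_eq_foldl]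
  have h0 : List.foldl PySem.Set.add ([] : List String) (k :: ks)
      = List.foldl PySem.Set.add [k] ks := by rfl
  rw [h0, ← List.takeWhile_append_dropWhile (p := fun x => x == k) (l := ks),
      List.foldl_append]
  rw [foldl_add_all_eq _ [k] htk List.mem_cons_self]
  rw [List.takeWhile_append_dropWhile]
  exact foldl_add_cons _ [] hknd

theorem pairwise_dropWhile {k : String} {ks : List String}
    (h : (k :: ks).Pairwise (· ≤ ·)) :
    (ks.dropWhile (fun x => x == k)).Pairwise (· ≤ ·) :=
  (List.pairwise_cons.1 h).2.sublist (List.dropWhile_sublist _)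

theorem ofList_pairwise_lt : ∀ (L : List String), L.Pairwise (· ≤ ·) →
    (PySem.Set.ofList L).Pairwise (· < ·) := by
  intro L
  induction L using rlGroup.induct with
  | case1 => intro _; simp [PySem.Set.ofList]
  | case2 k ks ih =>
      intro h
      rw [ofList_cons_decomp h]
      refine List.pairwise_cons.2 ⟨?_, ih (pairwise_dropWhile h)⟩
      intro y hy
      exact lt_of_mem_dropWhile h y ((PySem.Set.mem_ofList _ _).1 hy)

theorem rlGroup_spec : ∀ (L : List String), L.Pairwise (· ≤ ·) →
    rlGroup L = (PySem.Set.ofList L).map (fun x => (x, (L.count x : Int))) := by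
  intro L
  induction L using rlGroup.induct with
  | case1 => intro _; simp [rlGroup, PySem.Set.ofList]
  | case2 k ks ih =>
      intro h
      have htk : ∀ x ∈ ks.takeWhile (fun x => x == k), x = k := by
        intro x hx; simpa using List.mem_takeWhile_imp hx
      have hknd : k ∉ ks.dropWhile (fun x => x == k) := fun hm =>
        lt_irrefl k (lt_of_mem_dropWhile h k hm)
      rw [rlGroup, ofList_cons_decomp h, List.map_cons,
          ih (pairwise_dropWhile h)]
      congr 1
      · -- head
        congr 1
        have hsplit : ks.count k
            = (ks.takeWhile (fun x => x == k)).count k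
              + (ks.dropWhile (fun x => x == k)).count k := by
          conv_lhs => rw [← List.takeWhile_append_dropWhile (p := fun x => x == k) (l := ks)]
          exact List.count_append ..
        have h1 : (ks.takeWhile (fun x => x == k)).count k
            = (ks.takeWhile (fun x => x == k)).length :=
          List.count_eq_length.2 (fun b hb => (htk b hb).symm)
        have h2 : (ks.dropWhile (fun x => x == k)).count k = 0 :=
          List.count_eq_zero.2 hknd
        rw [List.count_cons_self, hsplit, h1, h2]
        push_cast
        ring
      · -- tail
        apply List.map_congr_left
        intro x hx
        have hxd : x ∈ ks.dropWhile (fun x => x == k) := (PySem.Set.mem_ofList _ _).1 hx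
        have hkx : k < x := lt_of_mem_dropWhile h x hxd
        have hxk : x ≠ k := ne_of_gt hkx
        congr 1
        have hxt : (ks.takeWhile (fun x => x == k)).count x = 0 :=
          List.count_eq_zero.2 (fun hm => hxk (htk x hm))
        have : ks.count x = (ks.dropWhile (fun x => x == k)).count x := by
          conv_lhs => rw [← List.takeWhile_append_dropWhile (p := fun x => x == k) (l := ks)]
          rw [List.count_append, hxt]
          omega
        rw [List.count_cons_of_ne (fun hh => hxk hh.symm), this]

-- ===== VERDICT (by name: the statement is the Claim_ definition above) =====
theorem registros_letras_spec : Claim_equal_registros_letras := by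
  intro data _ _
  unfold Spec_registros_letras registros_letras registros_letras_alt
  rw [foldA_eq_counter, sorted2_eq_sorted_lex]
  set keys := data.map (fun row => row.headD "") with hkeys
  set L := PySem.List.sorted keys (fun x => x) false with hL
  have hpwL : L.Pairwise (· ≤ ·) := by
    simpa using PySem.List.sorted_pairwise keys (fun x => x)
  have hperm : L.Perm keys := PySem.List.sorted_perm keys (fun x => x) false
  have hgrp := rlGroup_spec L hpwL
  have hmapc : (PySem.Set.ofList L).map (fun x => (x, (L.count x : Int)))
      = (PySem.Set.ofList L).map (fun x => (x, (keys.count x : Int))) := by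
    apply List.map_congr_left; intro x _
    rw [hperm.count_eq]
  have hsetperm : (PySem.Set.ofList L).Perm (PySem.Set.ofList keys) :=
    (List.perm_ext_iff_of_nodup (PySem.Set.nodup_ofList _) (PySem.Set.nodup_ofList _)).2
      (fun a => by simp [PySem.Set.mem_ofList, hperm.mem_iff])
  have hysperm : (rlGroup L).Perm ((PySem.Dict.counter keys).items) := by
    rw [hgrp, hmapc, PySem.Dict.items_counter]
    exact hsetperm.map _
  have hyspw : (rlGroup L).Pairwise
      (fun a b => (fun p : String × Int => toLex (p.1, p.2)) a < (fun p : String × Int => toLex (p.1, p.2)) b) := by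
    rw [hgrp, List.pairwise_map]
    exact (ofList_pairwise_lt L hpwL).imp (fun hlt => Prod.Lex.toLex_lt_toLex.2 (Or.inl hlt))
  exact PySem.List.sorted_eq_of_perm_of_pairwise_lt _ _ _ hysperm hyspw
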